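-- pv_equiv track=rewrite | github.com/mathofhy-alt/mathetf | math-variant-generator-v1/_legacy_archive/debug_scripts/test_paren_bug.py | _latex_to_hwp
-- ===== SOURCE A (Python) =====
-- def _extract_braced(s, pos):
--     if pos >= len(s) or s[pos] != '{': return '', pos
--     depth = 0
--     for i in range(pos, len(s)):
--         if s[i] == '{': depth += 1
--         elif s[i] == '}':
--             depth -= 1
--             if depth == 0: return s[pos+1:i], i+1
--     return s[pos+1:], len(s)
--
-- def _latex_to_hwp(s):
--     if not s: return s
--     result = []
--     i = 0
--     while i < len(s):
--         if s[i] == '\\\\':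
--             result.append(s[i])
--             i+=1
--         elif s[i] == '{':
--             content, i = _extract_braced(s, i)
--             inner = _latex_to_hwp(content)
--             result.append(f'{{{inner}}}')
--         elif s[i] == '^':
--             result.append('^')
--             i += 1
--             if i < len(s) and s[i] == '{':
--                 content, i = _extract_braced(s, i)
--                 result.append(f'{{{_latex_to_hwp(content)}}}')
--         elif s[i] == '_':
--             result.append('_')
--             i += 1
--             if i < len(s) and s[i] == '{':
--                 content, i = _extract_braced(s, i)
--                 result.append(f'{{{_latex_to_hwp(content)}}}')
--         elif s[i] == '(':
--             result.append('LEFT \(')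
--             i += 1
--         elif s[i] == ')':
--             result.append('RIGHT \)')
--             i += 1
--         else:
--             result.append(s[i])
--             i += 1
--     return "".join(result)
-- ===== SOURCE B (Python) =====
-- def _latex_to_hwp(s):
--     # Recursive-descent converter: one left-to-right pass over the string,
--     # emitting tokens into a single output list. A brace group is parsed by
--     # recursion and rendered between '{' and '}'; parens become the HWP
--     # delimiters; everything else is copied through.
--     out = []
--     def parse(i, in_group):
--         while i < len(s):
--             c = s[i]
--             i += 1
--             if c == '}' and in_group:
--                 return i
--             if c == '{':
--                 out.append('{')
--                 i = parse(i, True)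
--                 out.append('}')
--             elif c == '(':
--                 out.append('LEFT \\(')
--             elif c == ')':
--                 out.append('RIGHT \\)')
--             else:
--                 out.append(c)
--         return i
--     parse(0, False)
--     return ''.join(out)
-- ===== Notes on version B (the rewrite author's own statement) =====
-- stated objective: alternative
-- what changed: Replaces A's slice-out-and-rescan recursion (_extract_braced re-scans each brace group, which is then re-parsed recursively, with redundant ^/_ group special-casing) by a single left-to-right recursive-descent pass that emits tokens into one shared output list, visiting each character once; intended as faster on deep brace nesting (A is quadratic there), measured ~1.5x on random inputs, below the confirmation threshold.
import Mathlib
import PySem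

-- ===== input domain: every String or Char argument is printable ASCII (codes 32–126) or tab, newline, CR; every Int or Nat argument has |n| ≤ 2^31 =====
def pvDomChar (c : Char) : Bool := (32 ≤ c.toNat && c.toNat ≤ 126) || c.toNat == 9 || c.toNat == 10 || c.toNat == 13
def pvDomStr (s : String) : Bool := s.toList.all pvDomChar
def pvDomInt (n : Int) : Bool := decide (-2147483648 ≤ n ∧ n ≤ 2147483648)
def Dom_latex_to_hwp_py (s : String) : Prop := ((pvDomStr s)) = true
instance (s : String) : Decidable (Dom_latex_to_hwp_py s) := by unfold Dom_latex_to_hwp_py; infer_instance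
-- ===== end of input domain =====

-- B replaces A's slice-out-and-rescan brace recursion by a single left-to-right
-- recursive-descent pass emitting into one output accumulator.


-- ===== PORT A =====
-- the `for i in range(pos, len(s))` loop of _extract_braced, over the suffix s[pos:];
-- returns the relative index i at which depth first returns to 0, or none.
def ebScan : List Char → Int → Nat → Option Nat
  | [], _, _ => none
  | c :: rest, depth, i =>
    if c = '{' then ebScan rest (depth + 1) (i + 1)
    else if c = '}' then
      (if depth - 1 = 0 then some i else ebScan rest (depth - 1) (i + 1))
    else ebScan rest depth (i + 1)

-- _extract_braced(s, pos) on the suffix t = s[pos:]; returns (content, consumed chars)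
def extractBraced (t : List Char) : List Char × Nat :=
  match t with
  | [] => ([], 0)
  | c :: _ =>
    if c ≠ '{' then ([], 0)
    else
      match ebScan t 0 0 with
      | some i => ((t.drop 1).take (i - 1), i + 1)
      | none => (t.drop 1, t.length)

theorem extractBraced_fst_lt (t : List Char) (h : t ≠ []) :
    (extractBraced t).1.length < t.length := by
  match t with
  | c :: rest =>
    simp only [extractBraced]
    split_ifs with h1
    · simp
    · cases hs : ebScan (c :: rest) 0 0 with
      | some i => simp
      | none => simp

theorem extractBraced_snd_pos (t : List Char) (h : t.head? = some '{') :
    1 ≤ (extractBraced t).2 := by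
  match t with
  | c :: rest =>
    simp at h
    subst h
    simp only [extractBraced]
    split_ifs with h1
    · simp at h1
    · cases hs : ebScan ('{' :: rest) 0 0 with
      | some i => simp
      | none => simp

-- the `while i < len(s)` loop of _latex_to_hwp, over the remaining suffix of s
def latexCore (t : List Char) : List Char :=
  match t with
  | [] => []
  | c :: rest =>
    -- Python compares the 1-char s[i] against the 2-char literal '\\\\': always False; ported literally
    if String.ofList [c] = "\\\\" then c :: latexCore rest
    else if hc : c = '{' then
      '{' :: (latexCore (extractBraced (c :: rest)).1 ++
        '}' :: latexCore ((c :: rest).drop (extractBraced (c :: rest)).2))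
    else if c = '^' then
      '^' :: (if h2 : rest.head? = some '{' then
          '{' :: (latexCore (extractBraced rest).1 ++
            '}' :: latexCore (rest.drop (extractBraced rest).2))
        else latexCore rest)
    else if c = '_' then
      '_' :: (if h2 : rest.head? = some '{' then
          '{' :: (latexCore (extractBraced rest).1 ++
            '}' :: latexCore (rest.drop (extractBraced rest).2))
        else latexCore rest)
    else if c = '(' then
      "LEFT \\(".toList ++ latexCore rest
    else if c = ')' then
      "RIGHT \\)".toList ++ latexCore rest
    else
      c :: latexCore rest
termination_by t.length
decreasing_by
  all_goals simp only [List.length_cons, List.length_drop]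
  · omega
  · have := extractBraced_fst_lt (c :: rest) (by simp)
    simp only [List.length_cons] at this; omega
  · have := extractBraced_snd_pos (c :: rest) (by simp [hc])
    omega
  · have hne : rest ≠ [] := by intro hh; rw [hh] at h2; simp at h2
    have := extractBraced_fst_lt rest hne
    omega
  · omega
  · omega
  · have hne : rest ≠ [] := by intro hh; rw [hh] at h2; simp at h2
    have := extractBraced_fst_lt rest hne
    omega
  · omega
  · omega
  · omega
  · omega
  · omega

def latex_to_hwp_py (s : String) : String :=
  if s.toList = [] then s else String.ofList (latexCore s.toList)

-- ===== PORT B =====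
-- the `parse(i, in_group)` inner function of B, over the remaining suffix of s;
-- the shared `out` list is threaded as the accumulator `acc`; the returned index i
-- becomes the returned remaining suffix, whose length bound certifies termination.
def bParse : (t : List Char) → Bool → List Char → {p : List Char × List Char // p.2.length ≤ t.length}
  | [], _, acc => ⟨(acc, []), by simp⟩
  | c :: rest, inGroup, acc =>
    if c = '}' ∧ inGroup then ⟨(acc, rest), by simp⟩
    else if c = '{' then
      match bParse rest true (acc ++ ['{']) with
      | ⟨(o1, m1), h1⟩ =>
        match bParse m1 inGroup (o1 ++ ['}']) with
        | ⟨(o2, m2), h2⟩ => ⟨(o2, m2), by simp only [List.length_cons]; simp at h1 h2; omega⟩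
    else if c = '(' then
      match bParse rest inGroup (acc ++ "LEFT \\(".toList) with
      | ⟨p, h⟩ => ⟨p, by simp only [List.length_cons]; omega⟩
    else if c = ')' then
      match bParse rest inGroup (acc ++ "RIGHT \\)".toList) with
      | ⟨p, h⟩ => ⟨p, by simp only [List.length_cons]; omega⟩
    else
      match bParse rest inGroup (acc ++ [c]) with
      | ⟨p, h⟩ => ⟨p, by simp only [List.length_cons]; omega⟩
termination_by t => t.length
decreasing_by
  · simp
  · simp at h1; simp only [List.length_cons]; omega
  · simp
  · simp
  · simp

def latex_to_hwp_py_alt (s : String) : String :=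
  String.ofList ((bParse s.toList false []).1).1

-- ===== PRECONDITION & SPEC =====
def Spec_latex_to_hwp_py (s : String) (out : String) : Prop := out = latex_to_hwp_py_alt s
instance (s : String) (out : String) : Decidable (Spec_latex_to_hwp_py s out) := by unfold Spec_latex_to_hwp_py; infer_instance

-- ===== CLAIM (what is proved, stated in full; the proofs are below) =====
def Claim_equal_latex_to_hwp_py : Prop := ∀ (s : String), Dom_latex_to_hwp_py s → Spec_latex_to_hwp_py s (latex_to_hwp_py s)

-- ===== LEMMAS AND PROOFS =====

-- unclamped brace balance of a single char / a chunk
def balc (c : Char) : Int := if c = '{' then 1 else if c = '}' then -1 else 0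

def bal : List Char → Int
  | [] => 0
  | c :: r => balc c + bal r

-- the clamped open-group count after scanning t starting from d
def dAfter (d : Int) : List Char → Int
  | [] => d
  | c :: r => dAfter (if c = '{' then d + 1 else if c = '}' ∧ d > 0 then d - 1 else d) r

-- per-character output of the conversion
def fm1 (c : Char) : List Char :=
  if c = '(' then "LEFT \\(".toList else if c = ')' then "RIGHT \\)".toList else [c]

def fm (t : List Char) : List Char := t.flatMap fm1

theorem dAfter_append (x y : List Char) : ∀ d : Int, dAfter d (x ++ y) = dAfter (dAfter d x) y := by
  induction x with
  | nil => intro d; simp [dAfter]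
  | cons c r ih => intro d; simp [dAfter, ih]

theorem dAfter_eq_bal (t : List Char) : ∀ d : Int,
    (∀ p, p <+: t → 0 ≤ d + bal p) → dAfter d t = d + bal t := by
  induction t with
  | nil => intro d _; simp [dAfter, bal]
  | cons c r ih =>
    intro d h
    have hc : 0 ≤ d + bal [c] := h [c] ⟨r, rfl⟩
    simp only [bal] at hc
    have hstep : (if c = '{' then d + 1 else if c = '}' ∧ d > 0 then d - 1 else d) = d + balc c := by
      by_cases h1 : c = '{' <;> by_cases h2 : c = '}' <;>
        simp [balc, h1, h2] at hc ⊢ <;> omega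
    have hr : ∀ p, p <+: r → 0 ≤ (d + balc c) + bal p := by
      intro p hp
      obtain ⟨q, hq⟩ := hp
      have := h (c :: p) ⟨q, by simp [hq]⟩
      simp only [bal] at this
      omega
    simp only [dAfter, hstep, ih (d + balc c) hr, bal]
    ring

theorem ebScan_none (t : List Char) : ∀ (d : Int) (i : Nat), 1 ≤ d → ebScan t d i = none →
    ∀ p, p <+: t → 1 ≤ d + bal p := by
  induction t with
  | nil =>
    intro d i hd _ p hp
    have := List.prefix_nil.mp hp
    subst this
    simp [bal]; omega
  | cons c r ih =>
    intro d i hd h p hp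
    obtain ⟨q, hq⟩ := hp
    cases p with
    | nil => simp [bal]; omega
    | cons c' p' =>
      have hc : c = c' := by simpa using congrArg List.head? hq.symm
      subst hc
      have hp' : p' <+: r := ⟨q, by simpa using hq⟩
      simp only [ebScan] at h
      by_cases h1 : c = '{'
      · rw [if_pos h1] at h
        have := ih (d + 1) (i + 1) (by omega) h p' hp'
        have hbc : balc c = 1 := by simp [balc, h1]
        simp only [bal, hbc]
        omega
      · rw [if_neg h1] at h
        by_cases h2 : c = '}'
        · rw [if_pos h2] at h
          by_cases h3 : d - 1 = 0
          · rw [if_pos h3] at h; simp at h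
          · rw [if_neg h3] at h
            have := ih (d - 1) (i + 1) (by omega) h p' hp'
            have hbc : balc c = -1 := by simp [balc, h1, h2]
            simp only [bal, hbc]
            omega
        · rw [if_neg h2] at h
          have := ih d (i + 1) hd h p' hp'
          have hbc : balc c = 0 := by simp [balc, h1, h2]
          simp only [bal, hbc]
          omega

theorem ebScan_some (t : List Char) : ∀ (d : Int) (i j : Nat), 1 ≤ d → ebScan t d i = some j →
    ∃ a b, t = a ++ '}' :: b ∧ j = i + a.length ∧
      (∀ p, p <+: a → 1 ≤ d + bal p) ∧ d + bal a = 1 := by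
  induction t with
  | nil => intro d i j _ h; simp [ebScan] at h
  | cons c r ih =>
    intro d i j hd h
    simp only [ebScan] at h
    by_cases h1 : c = '{'
    · rw [if_pos h1] at h
      obtain ⟨a, b, ht, hj, hpre, hbal⟩ := ih (d + 1) (i + 1) j (by omega) h
      have hbc : balc c = 1 := by simp [balc, h1]
      refine ⟨c :: a, b, by simp [ht], by simp [hj]; omega, ?_, ?_⟩
      · intro p hp
        obtain ⟨q, hq⟩ := hp
        cases p with
        | nil => simp [bal]; omega
        | cons c' p' =>
          have hc : c = c' := by simpa using congrArg List.head? hq.symm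
          subst hc
          have := hpre p' ⟨q, by simpa using hq⟩
          simp only [bal, hbc]
          omega
      · simp only [bal, hbc]
        omega
    · rw [if_neg h1] at h
      by_cases h2 : c = '}'
      · rw [if_pos h2] at h
        by_cases h3 : d - 1 = 0
        · rw [if_pos h3] at h
          refine ⟨[], r, by simp [h2], by simpa using (Option.some.inj h).symm, ?_, ?_⟩
          · intro p hp
            have := List.prefix_nil.mp hp
            subst this
            simp [bal]; omega
          · simp [bal]; omega
        · rw [if_neg h3] at h
          obtain ⟨a, b, ht, hj, hpre, hbal⟩ := ih (d - 1) (i + 1) j (by omega) h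
          have hbc : balc c = -1 := by simp [balc, h1, h2]
          refine ⟨c :: a, b, by simp [ht], by simp [hj]; omega, ?_, ?_⟩
          · intro p hp
            obtain ⟨q, hq⟩ := hp
            cases p with
            | nil => simp [bal]; omega
            | cons c' p' =>
              have hc : c = c' := by simpa using congrArg List.head? hq.symm
              subst hc
              have := hpre p' ⟨q, by simpa using hq⟩
              simp only [bal, hbc]
              omega
          · simp only [bal, hbc]
            omega
      · rw [if_neg h2] at h
        obtain ⟨a, b, ht, hj, hpre, hbal⟩ := ih d (i + 1) j hd h
        have hbc : balc c = 0 := by simp [balc, h1, h2]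
        refine ⟨c :: a, b, by simp [ht], by simp [hj]; omega, ?_, ?_⟩
        · intro p hp
          obtain ⟨q, hq⟩ := hp
          cases p with
          | nil => simp [bal]; omega
          | cons c' p' =>
            have hc : c = c' := by simpa using congrArg List.head? hq.symm
            subst hc
            have := hpre p' ⟨q, by simpa using hq⟩
            simp only [bal, hbc]
            omega
        · simp only [bal, hbc]
          omega

-- the shared '{'-group case of the main induction
theorem braceCase (v : List Char)
    (IH : ∀ w : List Char, w.length < ('{' :: v).length →
      latexCore w = fm w ++ List.replicate (dAfter 0 w).toNat '}') :
    '{' :: (latexCore (extractBraced ('{' :: v)).1 ++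
        '}' :: latexCore (('{' :: v).drop (extractBraced ('{' :: v)).2))
      = fm ('{' :: v) ++ List.replicate (dAfter 0 ('{' :: v)).toNat '}' := by
  have hscan : ebScan ('{' :: v) 0 0 = ebScan v 1 1 := by simp [ebScan]
  cases hs : ebScan v 1 1 with
  | some j =>
    obtain ⟨a, b, hv, hj, hpre, hbal⟩ := ebScan_some v 1 1 j (by omega) hs
    have hcontent : (extractBraced ('{' :: v)).1 = a := by
      simp only [extractBraced, hscan, hs]
      simp [hv, hj]
    have hsnd : (extractBraced ('{' :: v)).2 = j + 1 := by
      simp [extractBraced, hscan, hs]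
    have hdrop : ('{' :: v).drop (extractBraced ('{' :: v)).2 = b := by
      rw [hsnd, hj, hv, List.drop_succ_cons,
        show a ++ '}' :: b = (a ++ ['}']) ++ b by simp,
        show 1 + a.length = (a ++ ['}']).length by simp [Nat.add_comm],
        List.drop_left]
    have hbal0 : bal a = 0 := by omega
    have hda : dAfter 0 a = 0 := by
      have := dAfter_eq_bal a 0 (fun p hp => by have := hpre p hp; omega)
      omega
    have hdt : dAfter 0 ('{' :: v) = dAfter 0 b := by
      have h1a : dAfter 1 a = 1 := by
        have := dAfter_eq_bal a 1 (fun p hp => by have := hpre p hp; omega)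
        omega
      have hstep : dAfter 0 ('{' :: v) = dAfter 1 v := by simp [dAfter]
      rw [hstep, hv, dAfter_append, h1a]
      simp only [dAfter]
      rw [if_neg (by decide), if_pos (by decide)]
      norm_num
    have hla : latexCore a = fm a := by
      rw [IH a (by simp only [hv, List.length_cons, List.length_append]; omega), hda]; simp
    have hlb : latexCore b = fm b ++ List.replicate (dAfter 0 b).toNat '}' :=
      IH b (by simp only [hv, List.length_cons, List.length_append]; omega)
    rw [hcontent, hdrop, hla, hlb, hdt]
    simp only [fm, hv, List.flatMap_cons, List.flatMap_append, List.flatMap_cons]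
    simp [fm1]
  | none =>
    have hpre := ebScan_none v 1 1 (by omega) hs
    have hcontent : (extractBraced ('{' :: v)).1 = v := by
      simp only [extractBraced, hscan, hs]
      simp
    have hdrop : ('{' :: v).drop (extractBraced ('{' :: v)).2 = [] := by
      simp only [extractBraced, hscan, hs]
      simp
    have hbnn : 0 ≤ bal v := by have := hpre v (List.prefix_refl v); omega
    have hdv : dAfter 0 v = bal v := by
      have := dAfter_eq_bal v 0 (fun p hp => by have := hpre p hp; omega)
      omega
    have hdt : dAfter 0 ('{' :: v) = 1 + bal v := by
      have hstep : dAfter 0 ('{' :: v) = dAfter 1 v := by simp [dAfter]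
      have := dAfter_eq_bal v 1 (fun p hp => by have := hpre p hp; omega)
      omega
    have hlv : latexCore v = fm v ++ List.replicate (bal v).toNat '}' := by
      rw [IH v (by simp), hdv]
    rw [hcontent, hdrop, hlv, hdt]
    have hrep : (1 + bal v).toNat = (bal v).toNat + 1 := by omega
    rw [hrep, List.replicate_succ']
    simp [latexCore, fm, fm1]

theorem latexCore_eq : ∀ (n : Nat) (t : List Char), t.length ≤ n →
    latexCore t = fm t ++ List.replicate (dAfter 0 t).toNat '}' := by
  intro n
  induction n with
  | zero =>
    intro t ht
    have : t = [] := by cases t <;> simp_all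
    subst this
    simp [latexCore, fm, dAfter]
  | succ n ihn =>
    intro t ht
    cases t with
    | nil => simp [latexCore, fm, dAfter]
    | cons c rest =>
      have hrest : rest.length ≤ n := by simp at ht; omega
      have hdead : ¬ (String.ofList [c] = "\\\\") := by
        intro hcon
        have h1 := congrArg String.toList hcon
        rw [String.toList_ofList] at h1
        have h2 := congrArg List.length h1
        simp at h2
      rw [latexCore.eq_def]
      simp only []
      rw [if_neg hdead]
      by_cases hc : c = '{'
      · subst hc
        rw [dif_pos rfl]
        exact braceCase rest (fun w hw => ihn w (by simp at hw ⊢; omega))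
      · rw [dif_neg hc]
        by_cases h1 : c = '^'
        · subst h1
          rw [if_pos rfl]
          have hfm : fm ('^' :: rest) = '^' :: fm rest := by simp [fm, fm1]
          have hdt : dAfter 0 ('^' :: rest) = dAfter 0 rest := by simp [dAfter]
          rw [hfm, hdt]
          by_cases h2 : rest.head? = some '{'
          · rw [dif_pos h2]
            cases rest with
            | nil => simp at h2
            | cons r0 r1 =>
              have : r0 = '{' := by simpa using h2
              subst this
              have := braceCase r1 (fun w hw => ihn w (by simp at hw hrest ⊢; omega))
              simpa using this
          · rw [dif_neg h2]
            rw [ihn rest hrest]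
            simp
        · rw [if_neg h1]
          by_cases h1' : c = '_'
          · subst h1'
            rw [if_pos rfl]
            have hfm : fm ('_' :: rest) = '_' :: fm rest := by simp [fm, fm1]
            have hdt : dAfter 0 ('_' :: rest) = dAfter 0 rest := by simp [dAfter]
            rw [hfm, hdt]
            by_cases h2 : rest.head? = some '{'
            · rw [dif_pos h2]
              cases rest with
              | nil => simp at h2
              | cons r0 r1 =>
                have : r0 = '{' := by simpa using h2
                subst this
                have := braceCase r1 (fun w hw => ihn w (by simp at hw hrest ⊢; omega))
                simpa using this
            · rw [dif_neg h2]
              rw [ihn rest hrest]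
              simp
          · rw [if_neg h1']
            by_cases hp : c = '('
            · subst hp
              rw [if_pos rfl, ihn rest hrest]
              simp [fm, fm1, dAfter]
            · rw [if_neg hp]
              by_cases hq : c = ')'
              · subst hq
                rw [if_pos rfl, ihn rest hrest]
                simp [fm, fm1, dAfter]
              · rw [if_neg hq, ihn rest hrest]
                have hfm : fm (c :: rest) = c :: fm rest := by simp [fm, fm1, hp, hq]
                have hdt : dAfter 0 (c :: rest) = dAfter 0 rest := by
                  simp [dAfter, hc]
                rw [hfm, hdt]
                simp

-- ===== B-side lemmas =====

theorem ebScan_add (t : List Char) : ∀ (d : Int) (i : Nat),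
    ebScan t d i = (ebScan t d 0).map (i + ·) := by
  induction t with
  | nil => intro d i; simp [ebScan]
  | cons c r ih =>
    intro d i
    simp only [ebScan]
    split_ifs with h1 h2 h3
    · rw [ih (d + 1) (i + 1), ih (d + 1) 1]
      cases ebScan r (d + 1) 0 <;> simp <;> omega
    · simp
    · rw [ih (d - 1) (i + 1), ih (d - 1) 1]
      cases ebScan r (d - 1) 0 <;> simp <;> omega
    · rw [ih d (i + 1), ih d 1]
      cases ebScan r d 0 <;> simp <;> omega

theorem ebScan_none_of (t : List Char) : ∀ (d : Int) (i : Nat),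
    (∀ p, p <+: t → 1 ≤ d + bal p) → ebScan t d i = none := by
  induction t with
  | nil => intro d i _; simp [ebScan]
  | cons c r ih =>
    intro d i h
    simp only [ebScan]
    split_ifs with h1 h2 h3
    · apply ih
      intro p hp
      obtain ⟨q, hq⟩ := hp
      have := h (c :: p) ⟨q, by simp [hq]⟩
      simp only [bal, balc, h1, if_pos] at this ⊢
      omega
    · exfalso
      have := h [c] ⟨r, rfl⟩
      simp only [bal, balc, h2] at this
      simp at this
      omega
    · apply ih
      intro p hp
      obtain ⟨q, hq⟩ := hp
      have := h (c :: p) ⟨q, by simp [hq]⟩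
      simp only [bal, balc, h1, h2] at this ⊢
      simp at this ⊢
      omega
    · apply ih
      intro p hp
      obtain ⟨q, hq⟩ := hp
      have := h (c :: p) ⟨q, by simp [hq]⟩
      simp only [bal, balc, h1, h2] at this ⊢
      simp [h1, h2] at this ⊢
      omega

theorem ebScan_skip (a : List Char) : ∀ (d : Int) (i : Nat) (b : List Char), 2 ≤ d →
    (∀ p, p <+: a → 2 ≤ d + bal p) → d + bal a = 2 →
    ebScan (a ++ '}' :: b) d i = ebScan b 1 (i + a.length + 1) := by
  induction a with
  | nil =>
    intro d i b hd h hb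
    have hd2 : d = 2 := by simp [bal] at hb; omega
    subst hd2
    simp only [List.nil_append, ebScan]
    rw [if_neg (by decide), if_pos (by decide), if_neg (by decide)]
    simp
  | cons c a' ih =>
    intro d i b hd h hb
    simp only [List.cons_append, ebScan]
    split_ifs with h1 h2 h3
    · rw [ih (d + 1) (i + 1) b (by omega) ?_ ?_]
      · congr 1
        simp only [List.length_cons]
        omega
      · intro p hp
        obtain ⟨q, hq⟩ := hp
        have := h (c :: p) ⟨q, by simp [hq]⟩
        simp only [bal, balc, h1, if_pos] at this
        omega
      · simp only [bal, balc, h1, if_pos] at hb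
        omega
    · exfalso
      have := h [c] ⟨a', rfl⟩
      simp only [bal, balc, h2] at this
      simp at this
      omega
    · rw [ih (d - 1) (i + 1) b ?_ ?_ ?_]
      · congr 1
        simp only [List.length_cons]
        omega
      · have := h [c] ⟨a', rfl⟩
        simp only [bal, balc, h2] at this
        simp [h1] at this
        omega
      · intro p hp
        obtain ⟨q, hq⟩ := hp
        have := h (c :: p) ⟨q, by simp [hq]⟩
        simp only [bal, balc, h1, h2] at this
        simp at this
        omega
      · simp only [bal, balc, h1, h2] at hb
        simp at hb
        omega
    · rw [ih d (i + 1) b hd ?_ ?_]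
      · congr 1
        simp only [List.length_cons]
        omega
      · intro p hp
        obtain ⟨q, hq⟩ := hp
        have := h (c :: p) ⟨q, by simp [hq]⟩
        simp only [bal, balc, h1, h2] at this
        simp [h1, h2] at this
        omega
      · simp only [bal, balc, h1, h2] at hb
        simp [h1, h2] at hb
        omega

-- the characterisation of bParse proved by strong induction
def BP (t : List Char) : Prop :=
  (∀ acc, (bParse t false acc).1 = (acc ++ fm t ++ List.replicate (dAfter 0 t).toNat '}', [])) ∧
  (∀ j acc, ebScan t 1 0 = some j →
    (bParse t true acc).1 = (acc ++ fm (t.take j), t.drop (j + 1))) ∧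
  (ebScan t 1 0 = none →
    ∀ acc, (bParse t true acc).1 = (acc ++ fm t ++ List.replicate (dAfter 0 t).toNat '}', []))

theorem bp_nil : BP [] := by
  refine ⟨?_, ?_, ?_⟩
  · intro acc; simp [bParse, fm, dAfter]
  · intro j acc h; simp [ebScan] at h
  · intro _ acc; simp [bParse, fm, dAfter]

theorem bParse_nil (g : Bool) (acc : List Char) : (bParse [] g acc).1 = (acc, []) := by
  simp [bParse]

theorem bParse_step (c : Char) (rest : List Char) (g : Bool) (acc : List Char)
    (hc : c ≠ '{') (hg : ¬(c = '}' ∧ g = true)) :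
    (bParse (c :: rest) g acc).1 = (bParse rest g (acc ++ fm1 c)).1 := by
  rw [bParse.eq_def]
  simp only []
  have h1 : ¬(c = '}' ∧ g) := by simpa using hg
  rw [if_neg h1, if_neg hc]
  by_cases h2 : c = '('
  · rw [if_pos h2]
    subst h2
    simp [fm1]
  · rw [if_neg h2]
    by_cases h3 : c = ')'
    · rw [if_pos h3]
      subst h3
      simp [fm1, h2]
    · rw [if_neg h3]
      simp [fm1, h2, h3]

theorem bp_brace (rest : List Char) (IH : ∀ w : List Char, w.length ≤ rest.length → BP w) :
    BP ('{' :: rest) := by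
  have hstep : ∀ (g : Bool) (acc : List Char), (bParse ('{' :: rest) g acc).1 =
      (bParse (bParse rest true (acc ++ ['{'])).1.2 g
        ((bParse rest true (acc ++ ['{'])).1.1 ++ ['}'])).1 := by
    intro g acc
    rw [bParse.eq_def]
    simp only []
    rw [if_neg (by simp), if_pos trivial]
  have hsc : ebScan ('{' :: rest) 1 0 = ebScan rest 2 1 := by simp [ebScan]
  cases hs : ebScan rest 1 0 with
  | some j =>
    obtain ⟨a, b, hv, hj, hpre, hbal⟩ := ebScan_some rest 1 0 j (by omega) hs
    have hj' : j = a.length := by simpa using hj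
    have hblen : b.length ≤ rest.length := by rw [hv]; simp; omega
    have htake : rest.take a.length = a := by rw [hv]; exact List.take_left ..
    have hdropr : rest.drop (a.length + 1) = b := by
      rw [hv, show a ++ '}' :: b = (a ++ ['}']) ++ b by simp,
        show a.length + 1 = (a ++ ['}']).length by simp, List.drop_left]
    have hinner : ∀ acc : List Char, (bParse rest true acc).1 = (acc ++ fm a, b) := by
      intro acc
      rw [(IH rest le_rfl).2.1 j acc hs, hj', htake, hdropr]
    have hd1a : dAfter 1 a = 1 := by
      have := dAfter_eq_bal a 1 (fun p hp => by have := hpre p hp; omega)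
      omega
    have hdt : dAfter 0 ('{' :: rest) = dAfter 0 b := by
      have h0 : dAfter 0 ('{' :: rest) = dAfter 1 rest := by simp [dAfter]
      rw [h0, hv, dAfter_append, hd1a]
      simp only [dAfter]
      rw [if_neg (by decide), if_pos (by decide)]
      norm_num
    have houter : ebScan ('{' :: rest) 1 0 = (ebScan b 1 0).map ((1 + a.length + 1) + ·) := by
      rw [hsc, hv, ebScan_skip a 2 1 b (by omega) (fun p hp => by have := hpre p hp; omega)
        (by omega), ebScan_add b 1 (1 + a.length + 1)]
    have hfmr : fm rest = fm a ++ '}' :: fm b := by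
      rw [hv]
      simp [fm, fm1]
    refine ⟨?_, ?_, ?_⟩
    · intro acc
      rw [hstep false acc, hinner (acc ++ ['{']), (IH b hblen).1 ((acc ++ ['{'] ++ fm a) ++ ['}']),
        hdt]
      have : fm ('{' :: rest) = '{' :: (fm a ++ '}' :: fm b) := by
        rw [show fm ('{' :: rest) = fm1 '{' ++ fm rest by simp [fm], hfmr]
        simp [fm1]
      rw [this]
      simp [List.append_assoc]
    · intro j2 acc hj2
      rw [houter] at hj2
      cases hx : ebScan b 1 0 with
      | none => rw [hx] at hj2; simp at hj2
      | some k =>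
        rw [hx] at hj2
        simp at hj2
        have hj2' : j2 = a.length + 2 + k := by omega
        subst hj2'
        rw [hstep true acc, hinner (acc ++ ['{']),
          (IH b hblen).2.1 k ((acc ++ ['{'] ++ fm a) ++ ['}']) hx]
        have htk : ('{' :: rest).take (a.length + 2 + k) = '{' :: (a ++ '}' :: b.take k) := by
          rw [show a.length + 2 + k = (a.length + 1 + k) + 1 by omega]
          rw [List.take_succ_cons, hv,
            show a.length + 1 + k = a.length + (1 + k) by omega, List.take_append]
          simp [List.take_succ_cons, Nat.add_comm]
        have hdk : ('{' :: rest).drop (a.length + 2 + k + 1) = b.drop (k + 1) := by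
          rw [show a.length + 2 + k + 1 = (a.length + 1 + k + 1) + 1 by omega]
          rw [List.drop_succ_cons, hv,
            show a.length + 1 + k + 1 = a.length + (1 + (k + 1)) by omega, List.drop_append]
          rw [List.drop_eq_nil_of_le (by omega),
            show a.length + (1 + (k + 1)) - a.length = (k + 1) + 1 by omega, List.drop_succ_cons]
          simp
        rw [htk, hdk]
        have : fm ('{' :: (a ++ '}' :: b.take k)) = '{' :: (fm a ++ '}' :: fm (b.take k)) := by
          simp [fm, fm1]
        rw [this]
        simp [List.append_assoc]
    · intro hn acc
      rw [houter] at hn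
      cases hx : ebScan b 1 0 with
      | some k => rw [hx] at hn; simp at hn
      | none =>
        rw [hstep true acc, hinner (acc ++ ['{']),
          (IH b hblen).2.2 hx ((acc ++ ['{'] ++ fm a) ++ ['}']), hdt]
        have : fm ('{' :: rest) = '{' :: (fm a ++ '}' :: fm b) := by
          rw [show fm ('{' :: rest) = fm1 '{' ++ fm rest by simp [fm], hfmr]
          simp [fm1]
        rw [this]
        simp [List.append_assoc]
  | none =>
    have hpre := ebScan_none rest 1 0 (by omega) hs
    have hinner := (IH rest le_rfl).2.2 hs
    have houter : ebScan ('{' :: rest) 1 0 = none := by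
      rw [hsc]
      exact ebScan_none_of rest 2 1 (fun p hp => by have := hpre p hp; omega)
    have hbrest : 0 ≤ bal rest := by have := hpre rest (List.prefix_refl rest); omega
    have hdr : dAfter 0 rest = bal rest := by
      have := dAfter_eq_bal rest 0 (fun p hp => by have := hpre p hp; omega)
      omega
    have hdt : dAfter 0 ('{' :: rest) = 1 + bal rest := by
      have h0 : dAfter 0 ('{' :: rest) = dAfter 1 rest := by simp [dAfter]
      have := dAfter_eq_bal rest 1 (fun p hp => by have := hpre p hp; omega)
      omega
    have hfinal : ∀ (g : Bool) (acc : List Char), (bParse ('{' :: rest) g acc).1 =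
        (acc ++ fm ('{' :: rest) ++ List.replicate (dAfter 0 ('{' :: rest)).toNat '}', []) := by
      intro g acc
      rw [hstep g acc, hinner (acc ++ ['{'])]
      simp only []
      rw [bParse_nil, hdt, hdr]
      have hrep : (1 + bal rest).toNat = (bal rest).toNat + 1 := by omega
      rw [hrep, List.replicate_succ']
      have : fm ('{' :: rest) = '{' :: fm rest := by simp [fm, fm1]
      rw [this]
      simp [List.append_assoc]
    exact ⟨fun acc => hfinal false acc,
      fun j acc hj => by rw [houter] at hj; simp at hj,
      fun _ acc => hfinal true acc⟩

theorem bp_char (c : Char) (rest : List Char) (hc : c ≠ '{') (IH : BP rest) :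
    BP (c :: rest) := by
  have hfm : fm (c :: rest) = fm1 c ++ fm rest := by simp [fm]
  have hd : dAfter 0 (c :: rest) = dAfter 0 rest := by
    simp [dAfter, hc]
  refine ⟨?_, ?_, ?_⟩
  · intro acc
    rw [bParse_step c rest false acc hc (by simp), IH.1 (acc ++ fm1 c), hfm, hd]
    simp [List.append_assoc]
  · intro j acc hj
    by_cases hcr : c = '}'
    · subst hcr
      have hj0 : j = 0 := by
        simp [ebScan] at hj
        omega
      subst hj0
      rw [bParse.eq_def]
      simp [fm]
    · have hsh : ebScan (c :: rest) 1 0 = ebScan rest 1 1 := by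
        simp only [ebScan]
        rw [if_neg hc, if_neg hcr]
      rw [hsh, ebScan_add rest 1 1] at hj
      cases hx : ebScan rest 1 0 with
      | none => rw [hx] at hj; simp at hj
      | some j' =>
        rw [hx] at hj
        simp at hj
        have hj1 : j = j' + 1 := by omega
        subst hj1
        rw [bParse_step c rest true acc hc (by simp [hcr]), IH.2.1 j' (acc ++ fm1 c) hx]
        simp [fm, List.append_assoc]
  · intro hn acc
    by_cases hcr : c = '}'
    · exfalso
      subst hcr
      simp [ebScan] at hn
    · have hsh : ebScan (c :: rest) 1 0 = ebScan rest 1 1 := by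
        simp only [ebScan]
        rw [if_neg hc, if_neg hcr]
      rw [hsh, ebScan_add rest 1 1] at hn
      have hx : ebScan rest 1 0 = none := by
        cases hx : ebScan rest 1 0 with
        | none => rfl
        | some k => rw [hx] at hn; simp at hn
      rw [bParse_step c rest true acc hc (by simp [hcr]), IH.2.2 hx (acc ++ fm1 c), hfm, hd]
      simp [List.append_assoc]

theorem bParse_eq : ∀ (n : Nat) (t : List Char), t.length ≤ n → BP t := by
  intro n
  induction n with
  | zero =>
    intro t ht
    have : t = [] := by cases t <;> simp_all
    subst this
    exact bp_nil
  | succ n ihn =>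
    intro t ht
    cases t with
    | nil => exact bp_nil
    | cons c rest =>
      have hrest : rest.length ≤ n := by simp at ht; omega
      by_cases hc : c = '{'
      · subst hc
        exact bp_brace rest (fun w hw => ihn w (by omega))
      · exact bp_char c rest hc (ihn rest hrest)

-- ===== VERDICT (by name: the statement is the Claim_ definition above) =====
theorem latex_to_hwp_py_spec : Claim_equal_latex_to_hwp_py := by
  intro s _
  unfold Spec_latex_to_hwp_py latex_to_hwp_py latex_to_hwp_py_alt
  have hB := (bParse_eq s.toList.length s.toList le_rfl).1 []
  by_cases h : s.toList = []
  · rw [h] at hB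
    rw [if_pos h, h, hB]
    rw [← String.ofList_toList (s := s), h]
    simp [fm, dAfter]
  · rw [if_neg h, latexCore_eq s.toList.length s.toList le_rfl, hB]
    simp
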